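-- pv_equiv track=rewrite | github.com/IMCHO/BAEKJOON | PROGRAMMERS/Brute-Force/mockExam.py | solution
-- ===== SOURCE A (Python) =====
-- def solution(answers):
--     answer = {i: 0 for i in range(3)}
--     length = len(answers)
--     p1 = [1, 2, 3, 4, 5] * (length // 5) + [1, 2, 3, 4, 5][0:length % 5]
--     p2 = [2, 1, 2, 3, 2, 4, 2, 5] * (length // 8) + [2, 1, 2, 3, 2, 4, 2, 5][0:length % 8]
--     p3 = [3, 3, 1, 1, 2, 2, 4, 4, 5, 5] * (length // 10) + [3, 3, 1, 1, 2, 2, 4, 4, 5, 5][0:length % 10]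
--
--     for a1, a2 in zip(answers, p1):
--         if a1 == a2: answer[0] += 1
--     for a1, a2 in zip(answers, p2):
--         if a1 == a2: answer[1] += 1
--     for a1, a2 in zip(answers, p3):
--         if a1 == a2: answer[2] += 1
--
--     maxNum = max(answer.values())
--     answer = sorted([v[0] + 1 for v in answer.items() if v[1] == maxNum])
--
--     return answer
-- ===== SOURCE B (Python) =====
-- def solution(answers):
--     # Histogram of answers keyed by (index mod 40, value); 40 = lcm of the pattern periods,
--     # so each pattern's score is a fixed 40-term sum of histogram lookups.
--     hist = {}
--     for i, a in enumerate(answers):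
--         k = (i % 40, a)
--         hist[k] = hist.get(k, 0) + 1
--     patterns = [[1, 2, 3, 4, 5], [2, 1, 2, 3, 2, 4, 2, 5], [3, 3, 1, 1, 2, 2, 4, 4, 5, 5]]
--     scores = [sum(hist.get((r, p[r % len(p)]), 0) for r in range(40)) for p in patterns]
--     m = max(scores)
--     return [k + 1 for k in range(3) if scores[k] == m]
-- ===== Notes on version B (the rewrite author's own statement) =====
-- stated objective: alternative
-- what changed: Instead of materializing three length-n pattern lists and comparing element by element in three loops, B builds a histogram keyed by (index mod 40, answer value) in one pass (40 = lcm of the pattern periods) and computes each pattern's score as a fixed 40-term sum of histogram lookups, so no per-element pattern comparison happens at all.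
import Mathlib
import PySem

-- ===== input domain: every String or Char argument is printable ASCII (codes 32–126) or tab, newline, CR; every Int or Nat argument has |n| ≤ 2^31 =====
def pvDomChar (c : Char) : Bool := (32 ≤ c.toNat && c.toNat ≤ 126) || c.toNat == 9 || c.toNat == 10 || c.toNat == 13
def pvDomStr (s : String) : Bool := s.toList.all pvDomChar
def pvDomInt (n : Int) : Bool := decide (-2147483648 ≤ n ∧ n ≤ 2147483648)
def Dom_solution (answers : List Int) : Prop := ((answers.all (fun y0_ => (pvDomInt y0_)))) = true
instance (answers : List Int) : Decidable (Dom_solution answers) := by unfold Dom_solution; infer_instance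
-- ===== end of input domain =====

-- B replaces A's per-element comparison against three materialized length-n pattern lists by a
-- histogram keyed by (index mod 40, value) — 40 = lcm of the pattern periods — built in one pass;
-- each score then is a fixed 40-term sum of histogram lookups (alternative algorithm, same cost).

-- ===== PORT A =====
def solution (answers : List Int) : List Int :=
  let answer : PySem.Dict Int Int :=
    (PySem.List.pyRange 0 3 1).foldl (fun d i => d.insert i 0) PySem.Dict.empty
  let length : Int := answers.length
  let p1 : List Int := PySem.List.pyRepeat [1, 2, 3, 4, 5] (PySem.Int.floordiv length 5)
    ++ PySem.List.slice [1, 2, 3, 4, 5] (some 0) (some (PySem.Int.mod length 5))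
  let p2 : List Int := PySem.List.pyRepeat [2, 1, 2, 3, 2, 4, 2, 5] (PySem.Int.floordiv length 8)
    ++ PySem.List.slice [2, 1, 2, 3, 2, 4, 2, 5] (some 0) (some (PySem.Int.mod length 8))
  let p3 : List Int := PySem.List.pyRepeat [3, 3, 1, 1, 2, 2, 4, 4, 5, 5] (PySem.Int.floordiv length 10)
    ++ PySem.List.slice [3, 3, 1, 1, 2, 2, 4, 4, 5, 5] (some 0) (some (PySem.Int.mod length 10))
  -- answer[k] += 1: the key is always present, so modify with default 0 is exact
  let answer := (answers.zip p1).foldl (fun d p => if p.1 = p.2 then d.modify 0 0 (· + 1) else d) answer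
  let answer := (answers.zip p2).foldl (fun d p => if p.1 = p.2 then d.modify 1 0 (· + 1) else d) answer
  let answer := (answers.zip p3).foldl (fun d p => if p.1 = p.2 then d.modify 2 0 (· + 1) else d) answer
  -- max() of answer.values(): the dict always has the three keys 0,1,2, so the list is nonempty and the getD default is never used
  let maxNum : Int := (PySem.List.max? answer.values (fun v => v)).getD 0
  PySem.List.sorted ((answer.items.filter (fun v => v.2 == maxNum)).map (fun v => v.1 + 1)) (fun x => x)

-- ===== PORT B =====
def solution_alt (answers : List Int) : List Int :=
  let hist : PySem.Dict (Int × Int) Int :=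
    (PySem.List.enumerate answers).foldl
      (fun d ia =>
        let k : Int × Int := (PySem.Int.mod ia.1 40, ia.2)
        d.insert k (d.getD k 0 + 1))
      PySem.Dict.empty
  let patterns : List (List Int) :=
    [[1, 2, 3, 4, 5], [2, 1, 2, 3, 2, 4, 2, 5], [3, 3, 1, 1, 2, 2, 4, 4, 5, 5]]
  let scores : List Int := patterns.map (fun p =>
    (PySem.List.pyRange 0 40 1).foldl
      (fun s r => s + hist.getD (r, PySem.List.pyGetD p (PySem.Int.mod r (p.length : Int)) 0) 0) 0)
  let m : Int := (PySem.List.max? scores (fun v => v)).getD 0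
  ((PySem.List.pyRange 0 3 1).filter (fun k => PySem.List.pyGetD scores k 0 == m)).map (fun k => k + 1)

-- ===== PRECONDITION & SPEC =====
def Spec_solution (answers : List Int) (out : List Int) : Prop := out = solution_alt answers
instance (answers : List Int) (out : List Int) : Decidable (Spec_solution answers out) := by unfold Spec_solution; infer_instance

-- ===== CLAIM =====
def Claim_equal_solution : Prop := ∀ (answers : List Int), Dom_solution answers → Spec_solution answers (solution answers)

-- ===== LEMMAS AND PROOFS =====

-- reference count: matches of answers[j], answers[j+1], … against f j, f (j+1), …
def cntSpec (f : Nat → Int) : List Int → Nat → Nat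
  | [], _ => 0
  | a :: t, j => (if a = f j then 1 else 0) + cntSpec f t (j + 1)

theorem cntSpec_congr (f g : Nat → Int) (h : ∀ j, f j = g j) :
    ∀ (xs : List Int) (j : Nat), cntSpec f xs j = cntSpec g xs j := by
  intro xs
  induction xs with
  | nil => intro j; rfl
  | cons a t ih => intro j; simp [cntSpec, h j, ih]

-- B's enumerate-based counts are cntSpec
theorem cnt_enum (f' : Int → Int) :
    ∀ (xs : List Int) (s : Nat),
      (PySem.List.enumerate xs (s : Int)).countP (fun p => decide (p.2 = f' p.1))
        = cntSpec (fun j => f' (j : Int)) xs s := by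
  intro xs
  induction xs with
  | nil => intro s; simp [PySem.List.enumerate_nil, cntSpec]
  | cons a t ih =>
    intro s
    rw [PySem.List.enumerate_cons]
    have : ((s : Int) + 1) = ((s + 1 : Nat) : Int) := by push_cast; ring
    rw [this]
    simp only [List.countP_cons, ih (s + 1), cntSpec]
    by_cases h : a = f' (s : Int) <;> simp [h] <;> omega

-- A's zip-loop counts are cntSpec
theorem cnt_zip (fN : Nat → Int) :
    ∀ (xs : List Int) (j : Nat),
      (xs.zip ((List.range' j xs.length).map fN)).countP (fun p => decide (p.1 = p.2))
        = cntSpec fN xs j := by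
  intro xs
  induction xs with
  | nil => intro j; simp [cntSpec]
  | cons a t ih =>
    intro j
    simp only [List.length_cons, List.range'_succ, List.map_cons, List.zip_cons_cons,
      List.countP_cons, ih (j + 1), cntSpec]
    by_cases h : a = fN j <;> simp [h] <;> omega

-- A's materialized pattern list is pointwise indexing-by-modulo into the base pattern
theorem pat_core (base : List Int) (m : Nat) (hm : base.length = m) :
    ∀ (q r : Nat), r ≤ m →
      PySem.List.pyRepeat base (q : Int) ++ base.take r
        = (List.range' 0 (q * m + r)).map (fun i => base.getD (i % m) 0) := by
  intro q
  induction q with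
  | zero =>
    intro r hr
    simp only [PySem.List.pyRepeat, Int.toNat_natCast, List.replicate, List.flatten_nil,
      Nat.zero_mul, Nat.zero_add, List.nil_append]
    apply List.ext_getElem
    · simp [hm]; omega
    · intro i h1 h2
      have him : i < m := by simp [hm] at h1; omega
      simp [List.getElem_range', Nat.mod_eq_of_lt him, List.getD,
        (by omega : i < base.length)]
  | succ q ih =>
    intro r hr
    have hrep : PySem.List.pyRepeat base ((q + 1 : Nat) : Int) = base ++ PySem.List.pyRepeat base (q : Int) := by
      simp [PySem.List.pyRepeat, List.replicate_succ]
    have hsplit : List.range' 0 ((q + 1) * m + r) = List.range' 0 m ++ List.range' m (q * m + r) := by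
      rw [(by ring : (q + 1) * m + r = m + (q * m + r)), ← List.range'_append]
      norm_num
    rw [hrep, List.append_assoc, ih r hr, hsplit, List.map_append]
    congr 1
    · apply List.ext_getElem
      · simp [hm]
      · intro i h1 h2
        have him : i < m := by simpa [hm] using h2
        simp [List.getElem_range', Nat.mod_eq_of_lt him, List.getD,
          (by omega : i < base.length)]
    · rw [List.range'_eq_map_range, List.range'_eq_map_range, List.map_map, List.map_map]
      apply List.map_congr_left
      intro i _
      simp [Nat.add_mod_left]

-- combined: A's pattern list for n answers
theorem pat_eq (base : List Int) (m : Nat) (hm : base.length = m) (hmpos : 0 < m) (n : Nat) :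
    PySem.List.pyRepeat base (((n / m : Nat)) : Int) ++ base.take (n % m)
      = (List.range' 0 n).map (fun i => base.getD (i % m) 0) := by
  have key := pat_core base m hm (n / m) (n % m) (le_of_lt (Nat.mod_lt n hmpos))
  have hn : n / m * m + n % m = n := by rw [Nat.mul_comm]; exact Nat.div_add_mod n m
  rwa [hn] at key

-- the conditional counting loop over a constant key: effect on getD
theorem getD_run (k k' : Int) :
    ∀ (l : List (Int × Int)) (d : PySem.Dict Int Int),
      (l.foldl (fun d (_ : Int × Int) => d.modify k 0 (· + 1)) d).getD k' 0
        = d.getD k' 0 + if k' = k then (l.length : Int) else 0 := by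
  intro l
  induction l with
  | nil => intro d; simp
  | cons p t ih =>
    intro d
    simp only [List.foldl_cons, ih, PySem.Dict.getD_modify, List.length_cons]
    by_cases h : k' = k <;> simp [h] <;> ring

theorem set_update_of_subset (s l : List Int) (h : ∀ x ∈ l, x ∈ s) :
    PySem.Set.update s l = s := by
  induction l with
  | nil => rfl
  | cons x t ih =>
    have hx : x ∈ s := h x (by simp)
    have : PySem.Set.add s x = s := by
      simp [PySem.Set.add, PySem.Set.contains, hx]
    simp only [PySem.Set.update, List.foldl_cons, this]
    exact ih (fun y hy => h y (by simp [hy]))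

-- the conditional counting loop keeps the key set unchanged when its key is already present
theorem loop_keys (k : Int) (l : List (Int × Int)) (d : PySem.Dict Int Int) (hk : k ∈ d.keys) :
    (l.foldl (fun d p => if p.1 = p.2 then d.modify k 0 (· + 1) else d) d).keys = d.keys := by
  rw [PySem.List.foldl_ite_eq_foldl_filter (p := fun p : Int × Int => p.1 = p.2)]
  rw [PySem.Dict.keys_foldl_modify_key _ (fun _ => k) 0 (fun _ _ => (· + 1))]
  apply set_update_of_subset
  intro x hx
  simp only [List.mem_map] at hx
  obtain ⟨_, _, rfl⟩ := hx
  exact hk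

theorem loop_getD (k k' : Int) (l : List (Int × Int)) (d : PySem.Dict Int Int) :
    (l.foldl (fun d p => if p.1 = p.2 then d.modify k 0 (· + 1) else d) d).getD k' 0
      = d.getD k' 0 + if k' = k then ((l.countP (fun p => decide (p.1 = p.2)) : Nat) : Int) else 0 := by
  rw [PySem.List.foldl_ite_eq_foldl_filter (p := fun p : Int × Int => p.1 = p.2), getD_run]
  simp [List.countP_eq_length_filter]

-- the three counting loops over the initial dict {0:0,1:0,2:0}, described by their items
theorem dict_items (l1 l2 l3 : List (Int × Int)) :
    (l3.foldl (fun d p => if p.1 = p.2 then d.modify 2 0 (· + 1) else d)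
      (l2.foldl (fun d p => if p.1 = p.2 then d.modify 1 0 (· + 1) else d)
        (l1.foldl (fun d p => if p.1 = p.2 then d.modify 0 0 (· + 1) else d)
          ((PySem.List.pyRange 0 3 1).foldl (fun d i => d.insert i 0) (PySem.Dict.empty : PySem.Dict Int Int))))).items
    = [(0, (l1.countP (fun p => decide (p.1 = p.2)) : Int)),
       (1, (l2.countP (fun p => decide (p.1 = p.2)) : Int)),
       (2, (l3.countP (fun p => decide (p.1 = p.2)) : Int))] := by
  set d0 : PySem.Dict Int Int := (PySem.List.pyRange 0 3 1).foldl (fun d i => d.insert i 0) PySem.Dict.empty with hd0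
  set d1 := l1.foldl (fun d p => if p.1 = p.2 then d.modify 0 0 (· + 1) else d) d0 with hd1
  set d2 := l2.foldl (fun d p => if p.1 = p.2 then d.modify 1 0 (· + 1) else d) d1 with hd2
  set d3 := l3.foldl (fun d p => if p.1 = p.2 then d.modify 2 0 (· + 1) else d) d2 with hd3
  have hk0 : d0.keys = [0, 1, 2] := by rw [hd0]; decide
  have hk1 : d1.keys = [0, 1, 2] := by rw [hd1, loop_keys 0 l1 d0 (by rw [hk0]; decide)]; exact hk0
  have hk2 : d2.keys = [0, 1, 2] := by rw [hd2, loop_keys 1 l2 d1 (by rw [hk1]; decide)]; exact hk1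
  have hk3 : d3.keys = [0, 1, 2] := by rw [hd3, loop_keys 2 l3 d2 (by rw [hk2]; decide)]; exact hk2
  have hg1 : d3.getD 0 0 = (l1.countP (fun p => decide (p.1 = p.2)) : Int) := by
    rw [hd3, loop_getD, hd2, loop_getD, hd1, loop_getD, hd0]
    norm_num
    decide
  have hg2 : d3.getD 1 0 = (l2.countP (fun p => decide (p.1 = p.2)) : Int) := by
    rw [hd3, loop_getD, hd2, loop_getD, hd1, loop_getD, hd0]
    norm_num
    decide
  have hg3 : d3.getD 2 0 = (l3.countP (fun p => decide (p.1 = p.2)) : Int) := by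
    rw [hd3, loop_getD, hd2, loop_getD, hd1, loop_getD, hd0]
    norm_num
    decide
  rw [PySem.Dict.items_eq_map_keys d3 (by rw [hk3]; decide) 0, hk3]
  simp [hg1, hg2, hg3]

-- === B-side lemmas: the histogram sum counts matches ===

-- an indicator sum over a list not containing j is 0
theorem indsum_notmem (f : Int → Int) (j v : Int) :
    ∀ (L : List Int), j ∉ L →
      (L.map (fun r => if ((r, f r) : Int × Int) = (j, v) then (1 : Int) else 0)).sum = 0 := by
  intro L
  induction L with
  | nil => intro _; simp
  | cons x t ih =>
    intro h
    have hx : x ≠ j := fun hxj => h (by simp [hxj])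
    simp only [List.map_cons, List.sum_cons]
    rw [if_neg (fun hc => hx (congrArg Prod.fst hc)), ih (fun ht => h (by simp [ht]))]
    ring

-- the indicator sum over a Nodup list containing j picks exactly the j-term
theorem indsum (f : Int → Int) (j v : Int) :
    ∀ (L : List Int), L.Nodup → j ∈ L →
      (L.map (fun r => if ((r, f r) : Int × Int) = (j, v) then (1 : Int) else 0)).sum
        = if v = f j then 1 else 0 := by
  intro L
  induction L with
  | nil => intro _ h; simp at h
  | cons x t ih =>
    intro hnd hm
    have hnd' := (List.nodup_cons.mp hnd)
    by_cases hxj : x = j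
    · subst hxj
      simp only [List.map_cons, List.sum_cons]
      rw [indsum_notmem f x v t hnd'.1]
      by_cases hv : v = f x <;> simp [Prod.mk.injEq, hv, eq_comm]
    · have hjt : j ∈ t := by
        rcases List.mem_cons.mp hm with h | h
        · exact absurd h.symm hxj
        · exact h
      simp only [List.map_cons, List.sum_cons]
      rw [if_neg (fun hc => hxj (congrArg Prod.fst hc)), ih hnd'.2 hjt]
      ring

-- summing the histogram's counts over all residues recovers the match count
theorem sum_count (f : Int → Int) :
    ∀ (ys : List (Int × Int)), (∀ y ∈ ys, 0 ≤ y.1 ∧ y.1 < 40) →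
      ((PySem.List.pyRange 0 40 1).map (fun r => ((ys.count (r, f r) : Nat) : Int))).sum
        = ((ys.countP (fun y => decide (y.2 = f y.1)) : Nat) : Int) := by
  intro ys
  induction ys with
  | nil => intro _; simp
  | cons y t ih =>
    intro h
    obtain ⟨j, v⟩ := y
    have hy := h (j, v) (by simp)
    have hmem : j ∈ PySem.List.pyRange 0 40 1 := by
      rw [PySem.List.mem_pyRange_one]
      exact ⟨hy.1, hy.2⟩
    have hcnt : ∀ r : Int, (((j, v) :: t).count (r, f r) : Int)
        = ((t.count (r, f r) : Nat) : Int) + (if ((r, f r) : Int × Int) = (j, v) then (1 : Int) else 0) := by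
      intro r
      rw [List.count_cons]
      by_cases hc : ((r, f r) : Int × Int) = (j, v)
      · rw [if_pos hc, if_pos (beq_iff_eq.mpr hc.symm)]
        push_cast
        ring
      · rw [if_neg hc, if_neg (by simp only [beq_iff_eq]; exact fun h => hc h.symm)]
        push_cast
        ring
    calc ((PySem.List.pyRange 0 40 1).map (fun r => ((((j, v) :: t).count (r, f r) : Nat) : Int))).sum
        = ((PySem.List.pyRange 0 40 1).map (fun r => ((t.count (r, f r) : Nat) : Int)
            + (if ((r, f r) : Int × Int) = (j, v) then (1 : Int) else 0))).sum := by
          congr 1; exact List.map_congr_left (fun r _ => hcnt r)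
      _ = ((PySem.List.pyRange 0 40 1).map (fun r => ((t.count (r, f r) : Nat) : Int))).sum
            + ((PySem.List.pyRange 0 40 1).map (fun r => if ((r, f r) : Int × Int) = (j, v) then (1 : Int) else 0)).sum := by
          rw [← List.sum_map_add]
      _ = ((t.countP (fun y => decide (y.2 = f y.1)) : Nat) : Int) + (if v = f j then 1 else 0) := by
          rw [ih (fun y hy' => h y (by simp [hy'])), indsum f j v _ (PySem.List.nodup_pyRange_one 0 40) hmem]
      _ = (((((j, v) :: t)).countP (fun y => decide (y.2 = f y.1)) : Nat) : Int) := by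
          rw [List.countP_cons]
          by_cases hv : v = f j <;> simp [hv] <;> push_cast <;> ring

-- every key of B's histogram has first component in [0, 40)
theorem keyed_bounds (answers : List Int) :
    ∀ y ∈ (PySem.List.enumerate answers).map (fun ia => ((PySem.Int.mod ia.1 40, ia.2) : Int × Int)),
      0 ≤ y.1 ∧ y.1 < 40 := by
  intro y hy
  simp only [List.mem_map] at hy
  obtain ⟨ia, hia, rfl⟩ := hy
  rw [PySem.List.mem_enumerate_iff] at hia
  obtain ⟨k, hk, rfl⟩ := hia
  simp only [zero_add]
  rw [show (40 : Int) = ((40 : Nat) : Int) from rfl, PySem.Int.mod_natCast]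
  constructor
  · positivity
  · exact_mod_cast Nat.mod_lt k (by norm_num)

-- B's score for one base pattern equals the canonical match count
theorem score_eq (p : List Int) (m : Nat) (hm : p.length = m) (hd : m ∣ 40) (answers : List Int) :
    (PySem.List.pyRange 0 40 1).foldl
      (fun s r => s + (PySem.Dict.counter
          ((PySem.List.enumerate answers).map (fun ia => ((PySem.Int.mod ia.1 40, ia.2) : Int × Int)))).getD
            (r, PySem.List.pyGetD p (PySem.Int.mod r (p.length : Int)) 0) 0) 0
      = ((cntSpec (fun j => p.getD (j % m) 0) answers 0 : Nat) : Int) := by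
  set f : Int → Int := fun r => PySem.List.pyGetD p (PySem.Int.mod r (p.length : Int)) 0 with hf
  set keyed := (PySem.List.enumerate answers).map (fun ia => ((PySem.Int.mod ia.1 40, ia.2) : Int × Int)) with hkeyed
  rw [PySem.List.foldl_add (g := fun r => (PySem.Dict.counter keyed).getD (r, f r) 0)]
  rw [zero_add]
  have hgd : ∀ r : Int, (PySem.Dict.counter keyed).getD (r, f r) 0 = ((keyed.count (r, f r) : Nat) : Int) :=
    fun r => PySem.Dict.getD_counter keyed (r, f r)
  rw [List.map_congr_left (fun r _ => hgd r), sum_count f keyed (keyed_bounds answers)]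
  congr 1
  rw [hkeyed, List.countP_map]
  have : ((fun y => decide (y.2 = f y.1)) ∘ fun ia => ((PySem.Int.mod ia.1 40, ia.2) : Int × Int))
      = fun ia : Int × Int => decide (ia.2 = f (PySem.Int.mod ia.1 40)) := rfl
  rw [this]
  rw [show (PySem.List.enumerate answers) = PySem.List.enumerate answers ((0 : Nat) : Int) from by norm_num,
    cnt_enum (f' := fun i => f (PySem.Int.mod i 40))]
  apply cntSpec_congr
  intro j
  rw [hf]
  simp only []
  rw [show (40 : Int) = ((40 : Nat) : Int) from rfl, PySem.Int.mod_natCast]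
  rw [← hm, show ((p.length : Nat) : Int) = ((p.length : Nat) : Int) from rfl]
  rw [show (p.length : Int) = ((p.length : Nat) : Int) from rfl, PySem.Int.mod_natCast,
    PySem.List.pyGetD_natCast]
  rw [hm, Nat.mod_mod_of_dvd j hd]

-- the final selection step, A's shape vs B's shape
theorem final_eq (a b c M : Int) :
    PySem.List.sorted ((([((0 : Int), a), (1, b), (2, c)]).filter (fun v => v.2 == M)).map (fun v => v.1 + 1)) (fun x => x)
      = ((PySem.List.pyRange 0 3 1).filter (fun k => PySem.List.pyGetD ([a, b, c] : List Int) k 0 == M)).map (fun k => k + 1) := by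
  have hr : PySem.List.pyRange 0 3 1 = [0, 1, 2] := by decide
  rw [hr]
  by_cases ha : a = M <;> by_cases hb : b = M <;> by_cases hc : c = M <;>
    simp [ha, hb, hc, PySem.List.pyGetD] <;> decide

-- ===== VERDICT (by name: the statement is the Claim_ definition above) =====
theorem solution_spec : Claim_equal_solution := by
  intro answers _
  unfold Spec_solution
  -- canonical counts
  set cb1 := cntSpec (fun i => ([1, 2, 3, 4, 5] : List Int).getD (i % 5) 0) answers 0 with hcb1
  set cb2 := cntSpec (fun i => ([2, 1, 2, 3, 2, 4, 2, 5] : List Int).getD (i % 8) 0) answers 0 with hcb2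
  set cb3 := cntSpec (fun i => ([3, 3, 1, 1, 2, 2, 4, 4, 5, 5] : List Int).getD (i % 10) 0) answers 0 with hcb3
  -- B reduces to the three canonical counts
  have hhist : (PySem.List.enumerate answers).foldl
      (fun (d : PySem.Dict (Int × Int) Int) ia =>
        d.insert (PySem.Int.mod ia.1 40, ia.2) (d.getD (PySem.Int.mod ia.1 40, ia.2) 0 + 1))
      PySem.Dict.empty
      = PySem.Dict.counter ((PySem.List.enumerate answers).map (fun ia => ((PySem.Int.mod ia.1 40, ia.2) : Int × Int))) := by
    rw [← List.foldl_map (f := fun ia : Int × Int => ((PySem.Int.mod ia.1 40, ia.2) : Int × Int))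
      (g := fun (d : PySem.Dict (Int × Int) Int) k => d.insert k (d.getD k 0 + 1))]
    exact PySem.Dict.foldl_insert_getD_add_one_eq_counter _
  have hB : solution_alt answers
      = ((PySem.List.pyRange 0 3 1).filter
          (fun k => PySem.List.pyGetD ([((cb1 : Nat) : Int), ((cb2 : Nat) : Int), ((cb3 : Nat) : Int)] : List Int) k 0
            == (PySem.List.max? ([((cb1 : Nat) : Int), ((cb2 : Nat) : Int), ((cb3 : Nat) : Int)] : List Int) (fun v => v)).getD 0)).map
          (fun k => k + 1) := by
    simp only [solution_alt, List.map_cons, List.map_nil]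
    rw [hhist]
    rw [score_eq [1, 2, 3, 4, 5] 5 rfl (by norm_num) answers,
        score_eq [2, 1, 2, 3, 2, 4, 2, 5] 8 rfl (by norm_num) answers,
        score_eq [3, 3, 1, 1, 2, 2, 4, 4, 5, 5] 10 rfl (by norm_num) answers]
  rw [hB]
  -- A's pattern lists are modulo indexing into the bases
  have hp1 : PySem.List.pyRepeat ([1, 2, 3, 4, 5] : List Int) (PySem.Int.floordiv (answers.length : Int) 5)
      ++ PySem.List.slice ([1, 2, 3, 4, 5] : List Int) (some 0) (some (PySem.Int.mod (answers.length : Int) 5))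
      = (List.range' 0 answers.length).map (fun i => ([1, 2, 3, 4, 5] : List Int).getD (i % 5) 0) := by
    rw [show (5 : Int) = ((5 : Nat) : Int) from by norm_num, PySem.Int.floordiv_natCast, PySem.Int.mod_natCast]
    simp only [PySem.List.slice_zero_start, PySem.List.slice_to_natCast]
    exact pat_eq _ 5 rfl (by norm_num) answers.length
  have hp2 : PySem.List.pyRepeat ([2, 1, 2, 3, 2, 4, 2, 5] : List Int) (PySem.Int.floordiv (answers.length : Int) 8)
      ++ PySem.List.slice ([2, 1, 2, 3, 2, 4, 2, 5] : List Int) (some 0) (some (PySem.Int.mod (answers.length : Int) 8))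
      = (List.range' 0 answers.length).map (fun i => ([2, 1, 2, 3, 2, 4, 2, 5] : List Int).getD (i % 8) 0) := by
    rw [show (8 : Int) = ((8 : Nat) : Int) from by norm_num, PySem.Int.floordiv_natCast, PySem.Int.mod_natCast]
    simp only [PySem.List.slice_zero_start, PySem.List.slice_to_natCast]
    exact pat_eq _ 8 rfl (by norm_num) answers.length
  have hp3 : PySem.List.pyRepeat ([3, 3, 1, 1, 2, 2, 4, 4, 5, 5] : List Int) (PySem.Int.floordiv (answers.length : Int) 10)
      ++ PySem.List.slice ([3, 3, 1, 1, 2, 2, 4, 4, 5, 5] : List Int) (some 0) (some (PySem.Int.mod (answers.length : Int) 10))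
      = (List.range' 0 answers.length).map (fun i => ([3, 3, 1, 1, 2, 2, 4, 4, 5, 5] : List Int).getD (i % 10) 0) := by
    rw [show (10 : Int) = ((10 : Nat) : Int) from by norm_num, PySem.Int.floordiv_natCast, PySem.Int.mod_natCast]
    simp only [PySem.List.slice_zero_start, PySem.List.slice_to_natCast]
    exact pat_eq _ 10 rfl (by norm_num) answers.length
  simp only [solution]
  rw [hp1, hp2, hp3]
  simp only [PySem.Dict.values]
  rw [dict_items]
  simp only [List.map_cons, List.map_nil]
  rw [cnt_zip, cnt_zip, cnt_zip]
  exact final_eq _ _ _ _
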